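-- pv_equiv track=rewrite | github.com/cosphere-org/lily | tests/test_search/test_latex.py | _select_cases
-- ===== SOURCE A (Python) =====
-- def _select_cases(cases):
--
--     def _select_case(c):
--         priority_test_run = (
--             any(map(lambda c: c.get('run_test', False), cases)))
--         return (
--             not priority_test_run or
--             (priority_test_run and c.get('run_test', False)))
--
--     return [c for c in cases if _select_case(c)]
-- ===== SOURCE B (Python) =====
-- def _select_cases(cases):
--     keep, rest = [], []
--     for c in cases:
--         (keep if c.get('run_test', False) else rest).append(c)
--     return keep if keep else rest
-- ===== Notes on version B (the rewrite author's own statement) =====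
-- stated objective: alternative
-- what changed: Replaced the per-element recomputed any(...) flag plus list-comprehension filter with a single pass that partitions cases into run_test and non-run_test buckets, returning the run_test bucket if non-empty, else the other (= all cases in order).
import Mathlib
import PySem

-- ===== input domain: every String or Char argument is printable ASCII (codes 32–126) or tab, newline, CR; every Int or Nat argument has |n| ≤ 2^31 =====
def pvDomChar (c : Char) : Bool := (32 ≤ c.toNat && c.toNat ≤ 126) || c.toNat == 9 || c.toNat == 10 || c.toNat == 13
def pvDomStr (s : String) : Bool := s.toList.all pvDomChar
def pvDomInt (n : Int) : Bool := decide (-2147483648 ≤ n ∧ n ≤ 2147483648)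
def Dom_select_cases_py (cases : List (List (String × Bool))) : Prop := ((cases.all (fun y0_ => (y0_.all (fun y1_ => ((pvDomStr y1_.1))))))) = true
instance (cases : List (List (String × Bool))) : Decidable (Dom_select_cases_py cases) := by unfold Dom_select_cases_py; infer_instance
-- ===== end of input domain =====

-- B replaces A's per-element recomputed any(...) flag + filter by a single
-- partitioning pass into two buckets; return value proved equal on all inputs.

-- ===== PORT A =====
-- c.get('run_test', False): first-match association-list lookup, default false
def pvGetRunTest (c : List (String × Bool)) : Bool :=
  match c.find? (fun kv => kv.1 == "run_test") with
  | some kv => kv.2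
  | none => false

def pvSelectCase (cases : List (List (String × Bool))) (c : List (String × Bool)) : Bool :=
  let priority_test_run := cases.any (fun c' => pvGetRunTest c')
  (!priority_test_run) || (priority_test_run && pvGetRunTest c)

def select_cases_py (cases : List (List (String × Bool))) : List (List (String × Bool)) :=
  cases.filter (fun c => pvSelectCase cases c)

-- ===== PORT B =====
def select_cases_py_alt (cases : List (List (String × Bool))) : List (List (String × Bool)) :=
  let kr := cases.foldl
    (fun (kr : List (List (String × Bool)) × List (List (String × Bool))) c =>
      if pvGetRunTest c then (kr.1 ++ [c], kr.2) else (kr.1, kr.2 ++ [c]))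
    ([], [])
  if kr.1.isEmpty then kr.2 else kr.1

-- ===== PRECONDITION & SPEC =====
def Spec_select_cases_py (cases : List (List (String × Bool))) (out : List (List (String × Bool))) : Prop := out = select_cases_py_alt cases
instance (cases : List (List (String × Bool))) (out : List (List (String × Bool))) : Decidable (Spec_select_cases_py cases out) := by unfold Spec_select_cases_py; infer_instance

-- ===== CLAIM (what is proved, stated in full; the proofs are below) =====
def Claim_equal_select_cases_py : Prop := ∀ (cases : List (List (String × Bool))), Dom_select_cases_py cases → Spec_select_cases_py cases (select_cases_py cases)

-- ===== LEMMAS AND PROOFS =====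

-- the partition fold appends the p-filter to the first bucket, the ¬p-filter to the second
theorem pvFold_partition (l : List (List (String × Bool)))
    (k r : List (List (String × Bool))) :
    l.foldl
      (fun (kr : List (List (String × Bool)) × List (List (String × Bool))) c =>
        if pvGetRunTest c then (kr.1 ++ [c], kr.2) else (kr.1, kr.2 ++ [c]))
      (k, r)
    = (k ++ l.filter (fun c => pvGetRunTest c),
       r ++ l.filter (fun c => !pvGetRunTest c)) := by
  induction l generalizing k r with
  | nil => simp
  | cons c t ih =>
    by_cases h : pvGetRunTest c = true <;>
      simp [h, ih]

-- ===== VERDICT (by name: the statement is the Claim_ definition above) =====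
theorem select_cases_py_spec : Claim_equal_select_cases_py := by
  intro cases _
  unfold Spec_select_cases_py select_cases_py select_cases_py_alt
  rw [pvFold_partition]
  by_cases h : cases.any (fun c' => pvGetRunTest c') = true
  · -- some case has run_test: A filters on run_test; B's first bucket is non-empty
    have hne : cases.filter (fun c => pvGetRunTest c) ≠ [] := by
      rcases List.any_eq_true.mp h with ⟨x, hx, hpx⟩
      intro hnil
      have : x ∈ cases.filter (fun c => pvGetRunTest c) :=
        List.mem_filter.mpr ⟨hx, hpx⟩
      simp [hnil] at this
    simp [pvSelectCase, h, List.isEmpty_iff, hne]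
  · -- no case has run_test: A keeps everything; B's first bucket is empty
    have hall : ∀ x ∈ cases, pvGetRunTest x = false := by
      intro x hx
      by_contra hc
      exact h (List.any_eq_true.mpr ⟨x, hx, by simpa using hc⟩)
    have hfil : cases.filter (fun c => pvGetRunTest c) = [] := by
      simp [List.filter_eq_nil_iff]
      intro x hx
      simp [hall x hx]
    have hfil2 : cases.filter (fun c => !pvGetRunTest c) = cases := by
      apply List.filter_eq_self.mpr
      intro x hx; simp [hall x hx]
    simp [pvSelectCase, h, hfil, hfil2]
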